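-- pv_equiv track=rewrite | github.com/daniel-reich/turbo-robot | PzyssSgqopkBjzTY2_16.py | can_exit
-- ===== SOURCE A (Python) =====
-- def can_exit(lst):
--   if lst[0][0] == 1:
--     return False
--   m = len(lst)
--   n = len(lst[0])
--   visited = [[False for c in range(n)] for r in range(m)]
--   to_visit = [(0,0)]
--
--   def add_location(row, col):
--     if not (0 <= row < m and 0 <= col < n):
--       return
--     if visited[row][col]:
--       return
--     if lst[row][col] == 1:
--       return
--     to_visit.append((row, col))
--
--   while not visited[m-1][n-1]:
--     if to_visit == []:
--       return False
--     (row, col) = to_visit.pop()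
--     visited[row][col] = True
--     add_location(row + 1, col)
--     add_location(row - 1, col)
--     add_location(row, col + 1)
--     add_location(row, col - 1)
--   return True
-- ===== SOURCE B (Python) =====
-- def can_exit(lst):
--     if lst[0][0] == 1:
--         return False
--     m = len(lst)
--     n = len(lst[0])
--     reach = {(0, 0)}
--     for _ in range(m * n):
--         old = len(reach)
--         for r in range(m):
--             for c in range(n):
--                 if lst[r][c] != 1 and (r, c) not in reach and (
--                         (r - 1, c) in reach or (r + 1, c) in reach
--                         or (r, c - 1) in reach or (r, c + 1) in reach):
--                     reach.add((r, c))
--         if len(reach) == old: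
--             break
--     return (m - 1, n - 1) in reach
-- ===== Notes on version B (the rewrite author's own statement) =====
-- stated objective: alternative
-- what changed: Replaced the explicit DFS stack with a per-cell visited matrix by round-based raster-scan dilation: a set of reachable cells is repeatedly grown by one full grid sweep (adding every open cell adjacent to the set) until a sweep adds nothing, then the exit's membership is tested.
-- outside the precondition, e.g. on can_exit([[0, 1], [1]]): A returns False, B raises IndexError; on can_exit([]): A raises IndexError, B raises IndexError
import Mathlib
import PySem

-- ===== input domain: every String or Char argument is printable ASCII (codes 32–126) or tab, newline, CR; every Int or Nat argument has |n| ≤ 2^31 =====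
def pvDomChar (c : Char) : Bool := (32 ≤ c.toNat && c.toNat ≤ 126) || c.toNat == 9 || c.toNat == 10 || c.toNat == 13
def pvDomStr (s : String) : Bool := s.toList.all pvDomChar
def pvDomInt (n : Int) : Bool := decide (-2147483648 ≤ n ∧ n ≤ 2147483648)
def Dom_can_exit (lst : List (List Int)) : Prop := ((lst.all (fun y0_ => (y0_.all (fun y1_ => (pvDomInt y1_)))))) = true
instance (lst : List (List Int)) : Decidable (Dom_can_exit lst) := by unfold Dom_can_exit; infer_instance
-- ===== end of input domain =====

-- B replaces A's DFS (explicit stack + visited matrix) by round-based raster-scan dilation of a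
-- reachable set to a fixed point (objective: alternative algorithm, not faster).
-- Python A's list indexing below occurs only with bounds-checked nonnegative indices (or the literal
-- lst[0][0], in range under Pre_): plain non-wrapping lookups are exact there.

-- ===== PORT A =====
-- lst[r][c], total form; exact wherever Python performs the read (indices are bounds-checked first)
def pvCell (g : List (List Int)) (r c : Int) : Int :=
  if 0 ≤ r ∧ 0 ≤ c then (g.getD r.toNat []).getD c.toNat 0 else 0

-- the bounds test 0 <= row < m and 0 <= col < n of add_location
def pvInR (g : List (List Int)) (r c : Int) : Bool :=
  decide (0 ≤ r) && decide (r < (g.length : Int)) && decide (0 ≤ c) && decide (c < (g.headI.length : Int))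

-- add_location's three tests minus the visited test: in range and not a wall
def pvGood (g : List (List Int)) (r c : Int) : Bool := pvInR g r c && (pvCell g r c != 1)

-- the four neighbours, in the order A calls add_location on them
def pvNbrs (p : Int × Int) : List (Int × Int) :=
  [(p.1 + 1, p.2), (p.1 - 1, p.2), (p.1, p.2 + 1), (p.1, p.2 - 1)]

-- visited[r][c] (False when out of range; Python only ever reads it in range)
def pvVget (v : List (List Bool)) (r c : Int) : Bool :=
  if 0 ≤ r ∧ 0 ≤ c then (v.getD r.toNat []).getD c.toNat false else false

-- visited[r][c] = True (no-op out of range; Python only ever writes it in range)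
def pvVset (v : List (List Bool)) (r c : Int) : List (List Bool) :=
  if 0 ≤ r ∧ 0 ≤ c then v.set r.toNat ((v.getD r.toNat []).set c.toNat true) else v

-- visited has the m×n shape of the grid
def pvShape (g : List (List Int)) (v : List (List Bool)) : Prop :=
  v.length = g.length ∧ ∀ row ∈ v, row.length = g.headI.length

-- stack invariant used only for termination: a visited cell on the stack has every good neighbour
-- either visited or pushed above it (closer to the top = the head)
def pvJ (g : List (List Int)) (v : List (List Bool)) (s : List (Int × Int)) : Prop :=
  ∀ i (hi : i < s.length), pvVget v (s[i]).1 (s[i]).2 = true →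
    ∀ q ∈ pvNbrs s[i], pvGood g q.1 q.2 = true →
      pvVget v q.1 q.2 = true ∨ q ∈ s.take i

def pvTInv (g : List (List Int)) (v : List (List Bool)) (s : List (Int × Int)) : Prop :=
  pvShape g v ∧ pvJ g v s ∧
    (0 < g.length → 0 < g.headI.length → ∀ p ∈ s, pvGood g p.1 p.2 = true)

def pvUnvis (v : List (List Bool)) : Nat := (v.map (fun row => row.count false)).sum


-- counting helpers for the termination measure
theorem pv_count_set (l : List Bool) (i : Nat) (h : i < l.length) (hf : l[i] = false) :
    (l.set i true).count false + 1 = l.count false := by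
  induction l generalizing i with
  | nil => simp at h
  | cons a t ih =>
    cases i with
    | zero => subst hf; simp
    | succ j =>
      simp only [List.set_cons_succ, List.count_cons]
      have := ih j (by simpa using h) (by simpa using hf)
      omega

theorem pv_sum_set (l : List Nat) (i : Nat) (a : Nat) (h : i < l.length) :
    (l.set i a).sum + l[i] = l.sum + a := by
  induction l generalizing i with
  | nil => simp at h
  | cons b t ih =>
    cases i with
    | zero => simp; omega
    | succ j =>
      have := ih j (by simpa using h)
      simp only [List.set_cons_succ, List.sum_cons, List.getElem_cons_succ]
      omega

theorem pv_inR_iff (g : List (List Int)) (r c : Int) :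
    pvInR g r c = true ↔ 0 ≤ r ∧ r < (g.length : Int) ∧ 0 ≤ c ∧ c < (g.headI.length : Int) := by
  simp [pvInR]; tauto

theorem pv_inR_degen (g : List (List Int)) (r c : Int)
    (hd : g.length = 0 ∨ g.headI.length = 0) : pvInR g r c = false := by
  rcases Bool.eq_false_or_eq_true (pvInR g r c) with hb | hb
  swap
  · exact hb
  · exfalso; rw [pv_inR_iff] at hb; rcases hd with h | h <;> omega

theorem pv_vget_vset_ne (v : List (List Bool)) (r c r' c' : Int) (hne : (r', c') ≠ (r, c)) :
    pvVget (pvVset v r c) r' c' = pvVget v r' c' := by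
  unfold pvVget pvVset
  by_cases h1 : 0 ≤ r ∧ 0 ≤ c
  · simp only [if_pos h1]
    by_cases h2 : 0 ≤ r' ∧ 0 ≤ c'
    · simp only [if_pos h2, List.getD_eq_getElem?_getD]
      by_cases hr : r'.toNat = r.toNat
      · have hrr : r' = r := by omega
        have hcc : c' ≠ c := by intro hc; exact hne (by rw [hrr, hc])
        have hcn : c'.toNat ≠ c.toNat := by omega
        by_cases hlen : r.toNat < v.length
        · rw [hr, List.getElem?_set_self hlen]
          simp only [Option.getD_some]
          rw [List.getElem?_set_ne (by omega : c.toNat ≠ c'.toNat)]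
        · rw [List.set_eq_of_length_le (by omega)]
      · rw [List.getElem?_set_ne (by omega)]
    · simp only [if_neg h2]
  · simp only [if_neg h1]

theorem pv_vget_vset_self (v : List (List Bool)) (r c : Int) (hr : 0 ≤ r) (hc : 0 ≤ c)
    (hrl : r.toNat < v.length) (hcl : c.toNat < (v.getD r.toNat []).length) :
    pvVget (pvVset v r c) r c = true := by
  unfold pvVget pvVset
  simp only [if_pos (And.intro hr hc), List.getD_eq_getElem?_getD, List.getElem?_set_self hrl,
    Option.getD_some]
  rw [List.getElem?_set_self (by simpa using hcl)]
  simp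

theorem pv_vset_of_vget_true (v : List (List Bool)) (r c : Int)
    (h : pvVget v r c = true) : pvVset v r c = v := by
  unfold pvVget at h
  unfold pvVset
  by_cases h1 : 0 ≤ r ∧ 0 ≤ c
  · simp only [if_pos h1] at h ⊢
    by_cases hrl : r.toNat < v.length
    · have hrow : v.getD r.toNat [] = v[r.toNat] := by
        simp [List.getD_eq_getElem?_getD, List.getElem?_eq_getElem hrl]
      by_cases hcl : c.toNat < (v.getD r.toNat []).length
      · have hval : (v.getD r.toNat [])[c.toNat] = true := by
          rw [List.getD_eq_getElem?_getD, List.getElem?_eq_getElem hcl] at h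
          simpa using h
        calc v.set r.toNat ((v.getD r.toNat []).set c.toNat true)
            = v.set r.toNat (v.getD r.toNat []) := by rw [← hval, List.set_getElem_self hcl]
          _ = v := by rw [hrow, List.set_getElem_self hrl]
      · exfalso
        rw [List.getD_eq_getElem?_getD (l := v.getD r.toNat []),
          List.getElem?_eq_none (by omega)] at h
        simp at h
    · exfalso
      rw [List.getD_eq_getElem?_getD (l := v), List.getElem?_eq_none (by omega)] at h
      simp at h
  · simp only [if_neg h1]

-- in-range bounds transported to the visited matrix
theorem pv_bounds (g : List (List Int)) (v : List (List Bool)) (r c : Int)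
    (hs : pvShape g v) (hin : pvInR g r c = true) :
    0 ≤ r ∧ 0 ≤ c ∧ r.toNat < v.length ∧ c.toNat < (v.getD r.toNat []).length := by
  rw [pv_inR_iff] at hin
  obtain ⟨h1, h2, h3, h4⟩ := hin
  have hv1 : v.length = g.length := hs.1
  have hrl : r.toNat < v.length := by omega
  refine ⟨h1, h3, hrl, ?_⟩
  have hrow : v.getD r.toNat [] = v[r.toNat] := by
    simp [List.getD_eq_getElem?_getD, List.getElem?_eq_getElem hrl]
  rw [hrow, hs.2 _ (List.getElem_mem hrl)]
  omega

theorem pv_vget_vset_iff (g : List (List Int)) (v : List (List Bool)) (x q : Int × Int)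
    (hs : pvShape g v) (hin : pvInR g x.1 x.2 = true) :
    pvVget (pvVset v x.1 x.2) q.1 q.2 = true ↔ (q = x ∨ pvVget v q.1 q.2 = true) := by
  obtain ⟨h1, h2, h3, h4⟩ := pv_bounds g v x.1 x.2 hs hin
  by_cases hq : q = x
  · subst hq
    simp [pv_vget_vset_self v q.1 q.2 h1 h2 h3 h4]
  · have hne : (q.1, q.2) ≠ (x.1, x.2) := by
      intro hc
      exact hq (Prod.ext (congrArg Prod.fst hc) (congrArg Prod.snd hc))
    rw [pv_vget_vset_ne v x.1 x.2 q.1 q.2 hne]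
    simp [hq]

theorem pv_shape_vset (g : List (List Int)) (v : List (List Bool)) (r c : Int)
    (hs : pvShape g v) : pvShape g (pvVset v r c) := by
  unfold pvVset
  by_cases h1 : 0 ≤ r ∧ 0 ≤ c
  · rw [if_pos h1]
    by_cases hrl : r.toNat < v.length
    · constructor
      · simp [hs.1]
      · intro row hrow
        rcases List.mem_or_eq_of_mem_set hrow with hm | he
        · exact hs.2 _ hm
        · subst he
          rw [List.length_set]
          have hget : v.getD r.toNat [] = v[r.toNat] := by
            simp [List.getD_eq_getElem?_getD, List.getElem?_eq_getElem hrl]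
          rw [hget]
          exact hs.2 _ (List.getElem_mem hrl)
    · rw [List.set_eq_of_length_le (by omega)]
      exact hs
  · rw [if_neg h1]
    exact hs

theorem pv_unvis_vset (g : List (List Int)) (v : List (List Bool)) (r c : Int)
    (hs : pvShape g v) (hin : pvInR g r c = true) (hf : pvVget v r c = false) :
    pvUnvis (pvVset v r c) + 1 = pvUnvis v := by
  obtain ⟨h1, h2, h3, h4⟩ := pv_bounds g v r c hs hin
  have hrow : v.getD r.toNat [] = v[r.toNat] := by
    simp [List.getD_eq_getElem?_getD, List.getElem?_eq_getElem h3]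
  have hval : (v.getD r.toNat [])[c.toNat] = false := by
    unfold pvVget at hf
    rw [if_pos ⟨h1, h2⟩, List.getD_eq_getElem?_getD (l := v.getD r.toNat []),
      List.getElem?_eq_getElem h4] at hf
    simpa using hf
  unfold pvVset pvUnvis
  rw [if_pos ⟨h1, h2⟩, List.map_set]
  have hmlen : r.toNat < (v.map (fun row => row.count false)).length := by simpa using h3
  have hsum := pv_sum_set (v.map (fun row => row.count false)) r.toNat
    (((v.getD r.toNat []).set c.toNat true).count false) hmlen
  have hget : (v.map (fun row => row.count false))[r.toNat] = (v.getD r.toNat []).count false := by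
    rw [List.getElem_map, hrow]
  rw [hget] at hsum
  have hcnt := pv_count_set (v.getD r.toNat []) c.toNat h4 hval
  omega

theorem pv_vget_replicate (m n : Nat) (r c : Int) :
    pvVget (List.replicate m (List.replicate n false)) r c = false := by
  unfold pvVget
  by_cases h1 : 0 ≤ r ∧ 0 ≤ c
  · rw [if_pos h1]
    simp only [List.getD_eq_getElem?_getD, List.getElem?_replicate]
    split <;> simp
  · rw [if_neg h1]

theorem pv_vget_degen (g : List (List Int)) (v : List (List Bool)) (r c : Int)
    (hs : pvShape g v) (hd : g.length = 0 ∨ g.headI.length = 0) : pvVget v r c = false := by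
  have hv1 : v.length = g.length := hs.1
  unfold pvVget
  by_cases h1 : 0 ≤ r ∧ 0 ≤ c
  · rw [if_pos h1]
    by_cases hr : r.toNat < v.length
    · have hrow : v.getD r.toNat [] = v[r.toNat] := by
        simp [List.getD_eq_getElem?_getD, List.getElem?_eq_getElem hr]
      have hlen : v[r.toNat].length = g.headI.length := hs.2 _ (List.getElem_mem hr)
      rcases hd with h | h
      · omega
      · rw [hrow, List.getD_eq_getElem?_getD (l := v[r.toNat]),
          List.getElem?_eq_none (show v[r.toNat].length ≤ c.toNat by omega)]
        simp
    · rw [List.getD_eq_getElem?_getD (l := v),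
        List.getElem?_eq_none (Nat.le_of_not_lt hr)]
      simp
  · rw [if_neg h1]

theorem pv_unvis_degen (g : List (List Int)) (v : List (List Bool))
    (hs : pvShape g v) (hd : g.length = 0 ∨ g.headI.length = 0) : pvUnvis v = 0 := by
  unfold pvUnvis
  rcases hd with h | h
  · have : v = [] := List.eq_nil_of_length_eq_zero (by rw [hs.1]; exact h)
    simp [this]
  · apply List.sum_eq_zero
    intro x hx
    simp only [List.mem_map] at hx
    obtain ⟨row, hrow, hxe⟩ := hx
    have : row.length = 0 := by rw [hs.2 _ hrow, h]
    have : row = [] := List.eq_nil_of_length_eq_zero this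
    simp [this] at hxe
    omega

-- membership in the pushed block
theorem pv_mem_pushed (g : List (List Int)) (v' : List (List Bool)) (x q : Int × Int) :
    q ∈ (((pvNbrs x).filter
        (fun q => pvGood g q.1 q.2 && !pvVget v' q.1 q.2)).reverse) ↔
      q ∈ pvNbrs x ∧ pvGood g q.1 q.2 = true ∧ pvVget v' q.1 q.2 = false := by
  simp [List.mem_filter]

theorem pvJ_tail (g : List (List Int)) (v : List (List Bool)) (x : Int × Int)
    (rest : List (Int × Int)) (hJ : pvJ g v (x :: rest)) (hvx : pvVget v x.1 x.2 = true) :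
    pvJ g v rest := by
  intro i hi hvis q hq hgood
  have h := hJ (i + 1) (by simpa using Nat.succ_lt_succ hi) (by simpa using hvis) q
    (by simpa using hq) hgood
  rcases h with h | h
  · exact Or.inl h
  · rw [List.take_succ_cons] at h
    rcases List.mem_cons.mp h with he | he
    · subst he; exact Or.inl hvx
    · exact Or.inr he

-- a visited stack top pushes nothing: all its good neighbours are already visited
theorem pv_pushed_nil_of_visited (g : List (List Int)) (v : List (List Bool)) (x : Int × Int)
    (rest : List (Int × Int)) (hs : pvShape g v) (hin : pvInR g x.1 x.2 = true)
    (hJ : pvJ g v (x :: rest)) (hvx : pvVget v x.1 x.2 = true) :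
    (pvNbrs x).filter (fun q => pvGood g q.1 q.2 && !pvVget (pvVset v x.1 x.2) q.1 q.2) = [] := by
  rw [List.filter_eq_nil_iff]
  intro q hq
  by_cases hg : pvGood g q.1 q.2 = true
  · have h0 := hJ 0 (by simp) (by simpa using hvx) q (by simpa using hq) hg
    rcases h0 with hv | hmem
    · have : pvVget (pvVset v x.1 x.2) q.1 q.2 = true :=
        (pv_vget_vset_iff g v x q hs hin).mpr (Or.inr hv)
      simp [this]
    · simp at hmem
  · simp [Bool.not_eq_true] at hg
    simp [hg]

theorem pvJ_step (g : List (List Int)) (v : List (List Bool)) (x : Int × Int)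
    (rest : List (Int × Int)) (hs : pvShape g v) (hin : pvInR g x.1 x.2 = true)
    (hJ : pvJ g v (x :: rest)) :
    pvJ g (pvVset v x.1 x.2)
      ((((pvNbrs x).filter
          (fun q => pvGood g q.1 q.2 && !pvVget (pvVset v x.1 x.2) q.1 q.2)).reverse) ++ rest) := by
  set v' := pvVset v x.1 x.2 with hv'
  set P := ((pvNbrs x).filter
      (fun q => pvGood g q.1 q.2 && !pvVget v' q.1 q.2)).reverse with hP
  have hiff : ∀ p : Int × Int, pvVget v' p.1 p.2 = true ↔ (p = x ∨ pvVget v p.1 p.2 = true) :=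
    fun p => pv_vget_vset_iff g v x p hs hin
  have hPmem : ∀ z : Int × Int, z ∈ P →
      z ∈ pvNbrs x ∧ pvGood g z.1 z.2 = true ∧ pvVget v' z.1 z.2 = false := by
    intro z hz
    rw [hP] at hz
    exact (pv_mem_pushed g v' x z).mp hz
  intro i hi hvis q hq hgood
  by_cases hilt : i < P.length
  · have hgl : (P ++ rest)[i] = P[i] := List.getElem_append_left hilt
    have hmem := hPmem _ (List.getElem_mem hilt)
    rw [hgl] at hvis
    rw [hmem.2.2] at hvis
    simp at hvis
  · have hlen : i < P.length + rest.length := by simpa using hi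
    have hgl : (P ++ rest)[i] = rest[i - P.length]'(by omega) :=
      List.getElem_append_right (by omega)
    rw [hgl] at hvis hq
    have htake : (P ++ rest).take i = P ++ rest.take (i - P.length) := by
      have hieq : i = P.length + (i - P.length) := by omega
      conv_lhs => rw [hieq]
      rw [List.take_length_add_append]
    by_cases hex : rest[i - P.length]'(by omega) = x
    · rw [hex] at hq
      by_cases hq' : pvVget v' q.1 q.2 = true
      · exact Or.inl hq'
      · right
        rw [htake]
        apply List.mem_append_left
        rw [hP]
        exact (pv_mem_pushed g v' x q).mpr ⟨hq, hgood, by simpa using hq'⟩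
    · have hve : pvVget v (rest[i - P.length]'(by omega)).1 (rest[i - P.length]'(by omega)).2
          = true := by
        rcases (hiff _).mp hvis with he | hv
        · exact absurd he hex
        · exact hv
      have hjlt : i - P.length < rest.length := by omega
      have hold := hJ (i - P.length + 1) (by simp only [List.length_cons]; omega)
        (by simpa using hve) q (by simpa using hq) hgood
      rcases hold with hv | hm
      · exact Or.inl ((hiff q).mpr (Or.inr hv))
      · rw [List.take_succ_cons] at hm
        rcases List.mem_cons.mp hm with he | hm
        · exact Or.inl ((hiff q).mpr (Or.inl he))
        · right
          rw [htake]
          exact List.mem_append_right _ hm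

theorem pvTInv_step (g : List (List Int)) (v : List (List Bool)) (x : Int × Int)
    (rest : List (Int × Int)) (h : pvTInv g v (x :: rest)) :
    pvTInv g (pvVset v x.1 x.2)
      ((((pvNbrs x).filter
          (fun q => pvGood g q.1 q.2 && !pvVget (pvVset v x.1 x.2) q.1 q.2)).reverse) ++ rest) := by
  obtain ⟨hs, hJ, hgd⟩ := h
  by_cases hdeg : g.length = 0 ∨ g.headI.length = 0
  · refine ⟨pv_shape_vset g v x.1 x.2 hs, ?_, ?_⟩
    · intro i hi hvis q hq hgood
      rw [pv_vget_degen g _ _ _ (pv_shape_vset g v x.1 x.2 hs) hdeg] at hvis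
      simp at hvis
    · intro hm hn
      exfalso
      rcases hdeg with hd | hd <;> omega
  · push_neg at hdeg
    have hm : 0 < g.length := by omega
    have hn : 0 < g.headI.length := by omega
    have hgx : pvGood g x.1 x.2 = true := hgd hm hn x (List.mem_cons_self)
    have hin : pvInR g x.1 x.2 = true := ((Bool.and_eq_true _ _).mp hgx).1
    by_cases hvx : pvVget v x.1 x.2 = true
    · have hveq : pvVset v x.1 x.2 = v := pv_vset_of_vget_true v x.1 x.2 hvx
      have hnil := pv_pushed_nil_of_visited g v x rest hs hin hJ hvx
      rw [hveq] at hnil ⊢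
      rw [hnil]
      simp only [List.reverse_nil, List.nil_append]
      exact ⟨hs, pvJ_tail g v x rest hJ hvx, fun _ _ p hp => hgd hm hn p (List.mem_cons_of_mem x hp)⟩
    · refine ⟨pv_shape_vset g v x.1 x.2 hs, pvJ_step g v x rest hs hin hJ, ?_⟩
      intro _ _ p hp
      rcases List.mem_append.mp hp with hp | hp
      · exact ((pv_mem_pushed g _ x p).mp hp).2.1
      · exact hgd hm hn p (List.mem_cons_of_mem x hp)

theorem pvMeasure_lt (g : List (List Int)) (v : List (List Bool)) (x : Int × Int)
    (rest : List (Int × Int)) (h : pvTInv g v (x :: rest)) :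
    5 * pvUnvis (pvVset v x.1 x.2) +
      ((((pvNbrs x).filter
          (fun q => pvGood g q.1 q.2 && !pvVget (pvVset v x.1 x.2) q.1 q.2)).reverse) ++ rest).length
      < 5 * pvUnvis v + (x :: rest).length := by
  obtain ⟨hs, hJ, hgd⟩ := h
  by_cases hdeg : g.length = 0 ∨ g.headI.length = 0
  · have hnil : (pvNbrs x).filter
        (fun q => pvGood g q.1 q.2 && !pvVget (pvVset v x.1 x.2) q.1 q.2) = [] := by
      rw [List.filter_eq_nil_iff]
      intro q hq
      simp [pvGood, pv_inR_degen g q.1 q.2 hdeg]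
    rw [hnil, pv_unvis_degen g _ (pv_shape_vset g v x.1 x.2 hs) hdeg,
      pv_unvis_degen g v hs hdeg]
    simp
  · push_neg at hdeg
    have hm : 0 < g.length := by omega
    have hn : 0 < g.headI.length := by omega
    have hgx : pvGood g x.1 x.2 = true := hgd hm hn x (List.mem_cons_self)
    have hin : pvInR g x.1 x.2 = true := ((Bool.and_eq_true _ _).mp hgx).1
    by_cases hvx : pvVget v x.1 x.2 = true
    · have hveq : pvVset v x.1 x.2 = v := pv_vset_of_vget_true v x.1 x.2 hvx
      have hnil := pv_pushed_nil_of_visited g v x rest hs hin hJ hvx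
      rw [hnil, hveq]
      simp
    · have hu := pv_unvis_vset g v x.1 x.2 hs hin (by simpa using hvx)
      have hl : (((pvNbrs x).filter
          (fun q => pvGood g q.1 q.2 && !pvVget (pvVset v x.1 x.2) q.1 q.2)).reverse).length ≤ 4 := by
        rw [List.length_reverse]
        calc ((pvNbrs x).filter _).length ≤ (pvNbrs x).length := List.length_filter_le _ _
          _ = 4 := rfl
      simp only [List.length_append, List.length_cons]
      omega

theorem pvTInv_init (g : List (List Int)) (h : ¬ pvCell g 0 0 = 1) :
    pvTInv g (List.replicate g.length (List.replicate g.headI.length false)) [(0, 0)] := by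
  refine ⟨⟨by simp, ?_⟩, ?_, ?_⟩
  · intro row hrow
    rw [List.eq_of_mem_replicate hrow]
    simp
  · intro i hi hvis q hq hgood
    rw [pv_vget_replicate] at hvis
    simp at hvis
  · intro hm hn p hp
    simp only [List.mem_singleton] at hp
    subst hp
    unfold pvGood
    rw [Bool.and_eq_true]
    constructor
    · rw [pv_inR_iff]
      simp
      omega
    · simpa [bne_iff_ne] using h

-- the while-loop: pop from the stack top (Python's list end is modeled as the list head), mark
-- visited, push the still-unvisited good neighbours in reverse call order (last appended = new top)
def pvDfs (g : List (List Int)) (v : List (List Bool)) (s : List (Int × Int))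
    (h : pvTInv g v s) : Bool :=
  if pvVget v ((g.length : Int) - 1) ((g.headI.length : Int) - 1) then true
  else
    match s, h with
    | [], _ => false
    | x :: rest, h =>
        pvDfs g (pvVset v x.1 x.2)
          ((((pvNbrs x).filter
              (fun q => pvGood g q.1 q.2 && !pvVget (pvVset v x.1 x.2) q.1 q.2)).reverse) ++ rest)
          (pvTInv_step g v x rest h)
termination_by 5 * pvUnvis v + s.length
decreasing_by exact pvMeasure_lt g v x rest h

def can_exit (lst : List (List Int)) : Bool :=
  if h : pvCell lst 0 0 = 1 then false
  else pvDfs lst (List.replicate lst.length (List.replicate lst.headI.length false)) [(0, 0)]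
    (pvTInv_init lst h)

-- ===== PORT B =====
-- one cell of the sweep: add (r,c) if it is open, new, and touches the reachable set
def pvScanStep (g : List (List Int)) (acc : PySem.Set (Int × Int)) (p : Int × Int) :
    PySem.Set (Int × Int) :=
  if (pvCell g p.1 p.2 != 1) && !(PySem.Set.contains acc p) &&
      (PySem.Set.contains acc (p.1 - 1, p.2) || PySem.Set.contains acc (p.1 + 1, p.2) ||
       PySem.Set.contains acc (p.1, p.2 - 1) || PySem.Set.contains acc (p.1, p.2 + 1))
  then PySem.Set.add acc p else acc

-- one full raster sweep: for r in range(m): for c in range(n)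
def pvScan (g : List (List Int)) (reach : PySem.Set (Int × Int)) : PySem.Set (Int × Int) :=
  (PySem.List.pyRange 0 (g.length : Int) 1).foldl
    (fun acc r =>
      (PySem.List.pyRange 0 (g.headI.length : Int) 1).foldl
        (fun acc2 c => pvScanStep g acc2 (r, c)) acc)
    reach

-- for _ in range(m*n): sweep; break when the sweep added nothing
def pvRounds (g : List (List Int)) : Nat → PySem.Set (Int × Int) → PySem.Set (Int × Int)
  | 0, reach => reach
  | k + 1, reach =>
      let old := reach.length
      let r' := pvScan g reach
      if r'.length = old then r' else pvRounds g k r'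

def can_exit_alt (lst : List (List Int)) : Bool :=
  if pvCell lst 0 0 == 1 then false
  else
    PySem.Set.contains
      (pvRounds lst (lst.length * lst.headI.length) (PySem.Set.ofList [((0 : Int), (0 : Int))]))
      ((lst.length : Int) - 1, (lst.headI.length : Int) - 1)

-- ===== PRECONDITION & SPEC =====
-- Pre_ excludes the empty grid and an empty first row (lst[0][0] raises IndexError in both
-- programs) and ragged grids with a row shorter than the first row: malformed input on which A
-- usually raises IndexError (rows at least as long as the first are harmless and stay inside).
def Pre_can_exit (lst : List (List Int)) : Prop :=
  lst ≠ [] ∧ 0 < lst.headI.length ∧ ∀ row ∈ lst, lst.headI.length ≤ row.length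
instance (lst : List (List Int)) : Decidable (Pre_can_exit lst) := by
  unfold Pre_can_exit; infer_instance

def pvWitness_can_exit : List (List Int) := [[0, 1], [0, 0]]

def Spec_can_exit (lst : List (List Int)) (out : Bool) : Prop := out = can_exit_alt lst
instance (lst : List (List Int)) (out : Bool) : Decidable (Spec_can_exit lst out) := by
  unfold Spec_can_exit; infer_instance

-- ===== CLAIM (what is proved, stated in full; the proofs are below) =====
def Claim_equal_can_exit : Prop :=
  ∀ (lst : List (List Int)), Dom_can_exit lst → Pre_can_exit lst →
    Spec_can_exit lst (can_exit lst)

-- ===== LEMMAS AND PROOFS =====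

-- one step of reachability: q is a good neighbour of p
def pvStep (g : List (List Int)) (p q : Int × Int) : Prop :=
  q ∈ pvNbrs p ∧ pvGood g q.1 q.2 = true

-- reachable from the entrance
def pvReach (g : List (List Int)) (p : Int × Int) : Prop :=
  Relation.ReflTransGen (pvStep g) (0, 0) p


-- geometry of the four-neighbour relation
theorem pv_nbrs_offsets (p q : Int × Int) (h : q ∈ pvNbrs p) :
    p = (q.1 - 1, q.2) ∨ p = (q.1 + 1, q.2) ∨ p = (q.1, q.2 - 1) ∨ p = (q.1, q.2 + 1) := by
  simp [pvNbrs, Prod.ext_iff] at *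
  omega

theorem pv_mem_nbrs_offsets (p nb : Int × Int)
    (h : nb = (p.1 - 1, p.2) ∨ nb = (p.1 + 1, p.2) ∨ nb = (p.1, p.2 - 1) ∨ nb = (p.1, p.2 + 1)) :
    p ∈ pvNbrs nb := by
  simp [pvNbrs, Prod.ext_iff] at *
  omega

-- ===== A-side correctness =====
def pvAInv (g : List (List Int)) (v : List (List Bool)) (s : List (Int × Int)) : Prop :=
  (∀ p : Int × Int, pvVget v p.1 p.2 = true → pvGood g p.1 p.2 = true ∧ pvReach g p) ∧
  (∀ p ∈ s, pvReach g p) ∧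
  (∀ p : Int × Int, pvVget v p.1 p.2 = true →
    ∀ q ∈ pvNbrs p, pvGood g q.1 q.2 = true → pvVget v q.1 q.2 = true ∨ q ∈ s) ∧
  ((0, 0) ∈ s ∨ pvVget v 0 0 = true)

theorem pvAInv_step (g : List (List Int)) (v : List (List Bool)) (x : Int × Int)
    (rest : List (Int × Int)) (hm : 0 < g.length) (hn : 0 < g.headI.length)
    (h : pvTInv g v (x :: rest)) (hA : pvAInv g v (x :: rest)) :
    pvAInv g (pvVset v x.1 x.2)
      ((((pvNbrs x).filter
          (fun q => pvGood g q.1 q.2 && !pvVget (pvVset v x.1 x.2) q.1 q.2)).reverse) ++ rest) := by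
  obtain ⟨hs, hJ, hgd⟩ := h
  have hgx : pvGood g x.1 x.2 = true := hgd hm hn x (List.mem_cons_self)
  have hin : pvInR g x.1 x.2 = true := ((Bool.and_eq_true _ _).mp hgx).1
  have hiff : ∀ p : Int × Int,
      pvVget (pvVset v x.1 x.2) p.1 p.2 = true ↔ (p = x ∨ pvVget v p.1 p.2 = true) :=
    fun p => pv_vget_vset_iff g v x p hs hin
  have hRx : pvReach g x := hA.2.1 x (List.mem_cons_self)
  refine ⟨?_, ?_, ?_, ?_⟩
  · intro p hp
    rcases (hiff p).mp hp with he | hv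
    · subst he
      exact ⟨hgx, hRx⟩
    · exact hA.1 p hv
  · intro p hp
    rcases List.mem_append.mp hp with hp | hp
    · have hp' := (pv_mem_pushed g _ x p).mp hp
      exact Relation.ReflTransGen.tail hRx ⟨hp'.1, hp'.2.1⟩
    · exact hA.2.1 p (List.mem_cons_of_mem x hp)
  · intro p hp q hq hgood
    rcases (hiff p).mp hp with he | hv
    · subst he
      by_cases hq' : pvVget (pvVset v p.1 p.2) q.1 q.2 = true
      · exact Or.inl hq'
      · right
        apply List.mem_append_left
        exact (pv_mem_pushed g _ p q).mpr ⟨hq, hgood, by simpa using hq'⟩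
    · rcases hA.2.2.1 p hv q hq hgood with hv' | hmem
      · exact Or.inl ((hiff q).mpr (Or.inr hv'))
      · rcases List.mem_cons.mp hmem with he | hmem
        · exact Or.inl ((hiff q).mpr (Or.inl he))
        · exact Or.inr (List.mem_append_right _ hmem)
  · rcases hA.2.2.2 with hm0 | hv0
    · rcases List.mem_cons.mp hm0 with he | hm0
      · exact Or.inr ((hiff (0, 0)).mpr (Or.inl he))
      · exact Or.inl (List.mem_append_right _ hm0)
    · exact Or.inr ((hiff (0, 0)).mpr (Or.inr hv0))

theorem pvAInv_init (g : List (List Int)) :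
    pvAInv g (List.replicate g.length (List.replicate g.headI.length false)) [(0, 0)] := by
  refine ⟨?_, ?_, ?_, ?_⟩
  · intro p hp
    rw [pv_vget_replicate] at hp
    simp at hp
  · intro p hp
    simp only [List.mem_singleton] at hp
    subst hp
    exact Relation.ReflTransGen.refl
  · intro p hp
    rw [pv_vget_replicate] at hp
    simp at hp
  · exact Or.inl (List.mem_singleton.mpr rfl)

theorem pvDfs_nil_iff (g : List (List Int)) (v : List (List Bool))
    (h : pvTInv g v []) (hA : pvAInv g v []) :
    (pvDfs g v [] h = true ↔
      pvReach g ((g.length : Int) - 1, (g.headI.length : Int) - 1)) := by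
  rw [pvDfs]
  split
  · next hvd =>
    simp only [true_iff]
    exact (hA.1 _ hvd).2
  · next hvd =>
    show false = true ↔ _
    simp only [Bool.false_eq_true, false_iff]
    intro hR
    have hstart : pvVget v 0 0 = true := by
      rcases hA.2.2.2 with hh | hh
      · simp at hh
      · exact hh
    have hall : ∀ p : Int × Int, pvReach g p → pvVget v p.1 p.2 = true := by
      intro p hp
      induction hp with
      | refl => exact hstart
      | tail hab hbc ihp =>
        rcases hA.2.2.1 _ ihp _ hbc.1 hbc.2 with hv | hv
        · exact hv
        · simp at hv
    exact hvd (hall _ hR)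

theorem pvDfs_true_iff (g : List (List Int)) (hm : 0 < g.length) (hn : 0 < g.headI.length) :
    ∀ N (v : List (List Bool)) (s : List (Int × Int)) (h : pvTInv g v s),
      5 * pvUnvis v + s.length ≤ N → pvAInv g v s →
      (pvDfs g v s h = true ↔
        pvReach g ((g.length : Int) - 1, (g.headI.length : Int) - 1)) := by
  intro N
  induction N with
  | zero =>
    intro v s h hN hA
    have hs0 : s = [] := List.eq_nil_of_length_eq_zero (by omega)
    subst hs0
    exact pvDfs_nil_iff g v h hA
  | succ n ih =>
    intro v s h hN hA
    match s, h, hA with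
    | [], h, hA => exact pvDfs_nil_iff g v h hA
    | x :: rest, h, hA =>
      rw [pvDfs.eq_def]
      split
      · next hvd =>
        simp only [true_iff]
        exact (hA.1 _ hvd).2
      · next hvd =>
        have hlt := pvMeasure_lt g v x rest h
        exact ih (pvVset v x.1 x.2) _ (pvTInv_step g v x rest h) (by omega)
          (pvAInv_step g v x rest hm hn h hA)

-- ===== B-side correctness =====
def pvCells (g : List (List Int)) : List (Int × Int) :=
  (PySem.List.pyRange 0 (g.length : Int) 1).flatMap
    (fun r => (PySem.List.pyRange 0 (g.headI.length : Int) 1).map (fun c => (r, c)))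

theorem pvScan_eq_foldl (g : List (List Int)) (reach : PySem.Set (Int × Int)) :
    pvScan g reach = (pvCells g).foldl (pvScanStep g) reach := by
  unfold pvScan pvCells
  rw [List.foldl_flatMap]
  simp [List.foldl_map]

theorem pv_mem_cells (g : List (List Int)) (q : Int × Int) :
    q ∈ pvCells g ↔ pvInR g q.1 q.2 = true := by
  simp only [pvCells, List.mem_flatMap, List.mem_map, PySem.List.mem_pyRange_one, pv_inR_iff]
  constructor
  · rintro ⟨r, hr, c, hc, rfl⟩
    exact ⟨hr.1, hr.2, hc.1, hc.2⟩
  · rintro ⟨h1, h2, h3, h4⟩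
    exact ⟨q.1, ⟨h1, h2⟩, q.2, ⟨h3, h4⟩, rfl⟩

theorem pv_scanStep_prefix (g : List (List Int)) (acc : PySem.Set (Int × Int)) (p : Int × Int) :
    acc <+: pvScanStep g acc p := by
  unfold pvScanStep
  split
  · rw [PySem.Set.add_eq_ite]
    split
    · exact List.prefix_rfl
    · exact List.prefix_append acc [p]
  · exact List.prefix_rfl

theorem pv_scanFoldl_prefix (g : List (List Int)) (l : List (Int × Int))
    (acc : PySem.Set (Int × Int)) : acc <+: l.foldl (pvScanStep g) acc := by
  induction l generalizing acc with
  | nil => exact List.prefix_rfl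
  | cons p l ihl => exact (pv_scanStep_prefix g acc p).trans (ihl _)

theorem pv_scanStep_nodup (g : List (List Int)) (acc : PySem.Set (Int × Int)) (p : Int × Int)
    (h : acc.Nodup) : (pvScanStep g acc p).Nodup := by
  unfold pvScanStep
  split
  · exact PySem.Set.nodup_add acc p h
  · exact h

theorem pv_scanStep_mem_cases (g : List (List Int)) (acc : PySem.Set (Int × Int))
    (p q : Int × Int) (hq : q ∈ pvScanStep g acc p) :
    q ∈ acc ∨ (q = p ∧ pvCell g p.1 p.2 ≠ 1 ∧
      ((p.1 - 1, p.2) ∈ acc ∨ (p.1 + 1, p.2) ∈ acc ∨ (p.1, p.2 - 1) ∈ acc ∨ (p.1, p.2 + 1) ∈ acc)) := by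
  unfold pvScanStep at hq
  split at hq
  · next hcond =>
    rw [PySem.Set.mem_add] at hq
    rcases hq with hq | hq
    · exact Or.inl hq
    · right
      simp only [Bool.and_eq_true, Bool.or_eq_true, bne_iff_ne, Bool.not_eq_true',
        PySem.Set.contains_iff] at hcond
      refine ⟨hq, hcond.1.1, ?_⟩
      rcases hcond.2 with ((hh | hh) | hh) | hh
      · exact Or.inl (by simpa [PySem.Set.contains_iff] using hh)
      · exact Or.inr (Or.inl (by simpa [PySem.Set.contains_iff] using hh))
      · exact Or.inr (Or.inr (Or.inl (by simpa [PySem.Set.contains_iff] using hh)))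
      · exact Or.inr (Or.inr (Or.inr (by simpa [PySem.Set.contains_iff] using hh)))
  · exact Or.inl hq

theorem pv_scanFoldl_sound (g : List (List Int)) (l : List (Int × Int))
    (acc : PySem.Set (Int × Int)) (hl : ∀ p ∈ l, pvInR g p.1 p.2 = true)
    (hacc : ∀ q ∈ acc, pvReach g q) : ∀ q ∈ l.foldl (pvScanStep g) acc, pvReach g q := by
  induction l generalizing acc with
  | nil => exact hacc
  | cons p l ihl =>
    refine ihl _ (fun z hz => hl z (List.mem_cons_of_mem p hz)) ?_
    intro q hq
    rcases pv_scanStep_mem_cases g acc p q hq with hq | ⟨rfl, hopen, hnb⟩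
    · exact hacc q hq
    · have hgq : pvGood g q.1 q.2 = true := by
        rw [pvGood, Bool.and_eq_true]
        exact ⟨hl q (List.mem_cons_self), by simpa [bne_iff_ne] using hopen⟩
      rcases hnb with hh | hh | hh | hh
      all_goals
        refine Relation.ReflTransGen.tail (hacc _ hh) ⟨pv_mem_nbrs_offsets q _ (by tauto), hgq⟩

theorem pv_scanFoldl_inR (g : List (List Int)) (l : List (Int × Int))
    (acc : PySem.Set (Int × Int)) (hl : ∀ p ∈ l, pvInR g p.1 p.2 = true)
    (hacc : ∀ q ∈ acc, pvInR g q.1 q.2 = true) :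
    ∀ q ∈ l.foldl (pvScanStep g) acc, pvInR g q.1 q.2 = true := by
  induction l generalizing acc with
  | nil => exact hacc
  | cons p l ihl =>
    refine ihl _ (fun z hz => hl z (List.mem_cons_of_mem p hz)) ?_
    intro q hq
    rcases pv_scanStep_mem_cases g acc p q hq with hq | ⟨rfl, _, _⟩
    · exact hacc q hq
    · exact hl q (List.mem_cons_self)

theorem pv_scanFoldl_nodup (g : List (List Int)) (l : List (Int × Int))
    (acc : PySem.Set (Int × Int)) (h : acc.Nodup) : (l.foldl (pvScanStep g) acc).Nodup := by
  induction l generalizing acc with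
  | nil => exact h
  | cons p l ihl => exact ihl _ (pv_scanStep_nodup g acc p h)

theorem pv_scan_fix_closed (g : List (List Int)) (reach : PySem.Set (Int × Int))
    (hfix : pvScan g reach = reach) :
    ∀ p ∈ reach, ∀ q ∈ pvNbrs p, pvGood g q.1 q.2 = true → q ∈ reach := by
  intro p hp q hq hgood
  by_contra hqn
  have hin : pvInR g q.1 q.2 = true := ((Bool.and_eq_true _ _).mp hgood).1
  have hopen : ¬ pvCell g q.1 q.2 = 1 := by
    have := ((Bool.and_eq_true _ _).mp hgood).2
    simpa [bne_iff_ne] using this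
  obtain ⟨l1, l2, hl⟩ := List.mem_iff_append.mp ((pv_mem_cells g q).mpr hin)
  rw [pvScan_eq_foldl, hl, List.foldl_append, List.foldl_cons] at hfix
  have ha1pre : reach <+: List.foldl (pvScanStep g) reach l1 := pv_scanFoldl_prefix g l1 reach
  have hfin : pvScanStep g (List.foldl (pvScanStep g) reach l1) q <+: reach := by
    conv_rhs => rw [← hfix]
    exact pv_scanFoldl_prefix g l2 _
  have ha1r : List.foldl (pvScanStep g) reach l1 <+: reach :=
    (pv_scanStep_prefix g _ q).trans hfin
  have ha1 : List.foldl (pvScanStep g) reach l1 = reach :=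
    ha1r.eq_of_length_le ha1pre.length_le
  rw [ha1] at hfin
  have hcond : ((pvCell g q.1 q.2 != 1) && !(PySem.Set.contains reach q) &&
      (PySem.Set.contains reach (q.1 - 1, q.2) || PySem.Set.contains reach (q.1 + 1, q.2) ||
       PySem.Set.contains reach (q.1, q.2 - 1) || PySem.Set.contains reach (q.1, q.2 + 1))) = true := by
    simp only [Bool.and_eq_true, Bool.or_eq_true, bne_iff_ne, Bool.not_eq_true',
      PySem.Set.contains_iff]
    refine ⟨⟨hopen, by simpa [PySem.Set.contains_iff] using hqn⟩, ?_⟩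
    rcases pv_nbrs_offsets p q hq with hh | hh | hh | hh <;> rw [← hh] <;> tauto
  rw [pvScanStep, if_pos hcond, PySem.Set.add_of_not_mem hqn] at hfin
  have := hfin.length_le
  simp at this

theorem pv_full (g : List (List Int)) (l : List (Int × Int)) (hnd : l.Nodup)
    (hsub : ∀ p ∈ l, pvInR g p.1 p.2 = true)
    (hlen : g.length * g.headI.length ≤ l.length) :
    ∀ q : Int × Int, pvInR g q.1 q.2 = true → q ∈ l := by
  intro q hq
  have hmemF : ∀ z : Int × Int,
      z ∈ (Finset.Ico (0 : Int) (g.length : Int)) ×ˢ (Finset.Ico (0 : Int) (g.headI.length : Int))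
        ↔ pvInR g z.1 z.2 = true := by
    intro z
    rw [pv_inR_iff, Finset.mem_product, Finset.mem_Ico, Finset.mem_Ico]
    tauto
  have hsubF : l.toFinset ⊆
      (Finset.Ico (0 : Int) (g.length : Int)) ×ˢ (Finset.Ico (0 : Int) (g.headI.length : Int)) :=
    fun z hz => (hmemF z).mpr (hsub z (List.mem_toFinset.mp hz))
  have hcardF : ((Finset.Ico (0 : Int) (g.length : Int)) ×ˢ
      (Finset.Ico (0 : Int) (g.headI.length : Int))).card = g.length * g.headI.length := by
    rw [Finset.card_product, Int.card_Ico, Int.card_Ico]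
    simp
  have heq : l.toFinset =
      (Finset.Ico (0 : Int) (g.length : Int)) ×ˢ (Finset.Ico (0 : Int) (g.headI.length : Int)) := by
    apply Finset.eq_of_subset_of_card_le hsubF
    rw [hcardF, List.toFinset_card_of_nodup hnd]
    exact hlen
  rw [← List.mem_toFinset, heq, hmemF]
  exact hq

theorem pv_rounds_mem_mono (g : List (List Int)) :
    ∀ (k : Nat) (reach : PySem.Set (Int × Int)), ∀ q ∈ reach, q ∈ pvRounds g k reach := by
  intro k
  induction k with
  | zero => intro reach q hq; simpa [pvRounds] using hq
  | succ n ihk =>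
    intro reach q hq
    have hq' : q ∈ pvScan g reach := by
      rw [pvScan_eq_foldl]
      exact (pv_scanFoldl_prefix g _ reach).subset hq
    simp only [pvRounds]
    split
    · exact hq'
    · exact ihk _ q hq'

theorem pv_rounds_sound (g : List (List Int)) :
    ∀ (k : Nat) (reach : PySem.Set (Int × Int)), (∀ q ∈ reach, pvReach g q) →
      ∀ q ∈ pvRounds g k reach, pvReach g q := by
  intro k
  induction k with
  | zero => intro reach hacc q hq; exact hacc q (by simpa [pvRounds] using hq)
  | succ n ihk =>
    intro reach hacc q hq
    have hscan : ∀ z ∈ pvScan g reach, pvReach g z := by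
      rw [pvScan_eq_foldl]
      exact pv_scanFoldl_sound g _ reach (fun p hp => (pv_mem_cells g p).mp hp) hacc
    simp only [pvRounds] at hq
    split at hq
    · exact hscan q hq
    · exact ihk _ hscan q hq

theorem pv_rounds_closed (g : List (List Int)) :
    ∀ (k : Nat) (reach : PySem.Set (Int × Int)), reach.Nodup →
      (∀ p ∈ reach, pvInR g p.1 p.2 = true) →
      g.length * g.headI.length ≤ k + reach.length →
      ∀ p ∈ pvRounds g k reach, ∀ q ∈ pvNbrs p, pvGood g q.1 q.2 = true →
        q ∈ pvRounds g k reach := by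
  intro k
  induction k with
  | zero =>
    intro reach hnd hsub hcard p hp q hq hgood
    simp only [pvRounds] at hp ⊢
    exact pv_full g reach hnd hsub (by omega) q ((Bool.and_eq_true _ _).mp hgood).1
  | succ n ihk =>
    intro reach hnd hsub hcard
    have hpre : reach <+: pvScan g reach := by
      rw [pvScan_eq_foldl]
      exact pv_scanFoldl_prefix g _ reach
    simp only [pvRounds]
    split
    · next hfixlen =>
      have hfix : pvScan g reach = reach := (hpre.eq_of_length_le hfixlen.le).symm
      rw [hfix]
      exact pv_scan_fix_closed g reach hfix
    · next hfixlen =>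
      apply ihk (pvScan g reach)
        (by rw [pvScan_eq_foldl]; exact pv_scanFoldl_nodup g _ reach hnd)
        (by rw [pvScan_eq_foldl]
            exact pv_scanFoldl_inR g _ reach (fun p hp => (pv_mem_cells g p).mp hp) hsub)
      have := hpre.length_le
      omega

theorem pv_alt_iff (g : List (List Int)) (hm : 0 < g.length) (hn : 0 < g.headI.length)
    (hc : ¬ pvCell g 0 0 = 1) :
    (can_exit_alt g = true ↔
      pvReach g ((g.length : Int) - 1, (g.headI.length : Int) - 1)) := by
  unfold can_exit_alt
  rw [if_neg (by simpa using hc)]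
  rw [PySem.Set.contains_iff]
  have hof : PySem.Set.ofList [((0 : Int), (0 : Int))] = [((0 : Int), (0 : Int))] := rfl
  rw [hof]
  constructor
  · intro hdest
    exact pv_rounds_sound g _ [((0 : Int), (0 : Int))]
      (by intro q hq
          simp only [List.mem_singleton] at hq
          subst hq
          exact Relation.ReflTransGen.refl) _ hdest
  · intro hR
    have hcl := pv_rounds_closed g (g.length * g.headI.length) [((0 : Int), (0 : Int))]
      (by simp)
      (by intro p hp
          simp only [List.mem_singleton] at hp
          subst hp
          rw [pv_inR_iff]
          simp
          omega)
      (by simp)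
    have hstart : ((0 : Int), (0 : Int)) ∈
        pvRounds g (g.length * g.headI.length) [((0 : Int), (0 : Int))] :=
      pv_rounds_mem_mono g _ _ _ (List.mem_singleton.mpr rfl)
    have hmem : ∀ b : Int × Int, pvReach g b →
        b ∈ pvRounds g (g.length * g.headI.length) [((0 : Int), (0 : Int))] := by
      intro b hb
      induction hb with
      | refl => exact hstart
      | tail hab hbc ihp => exact hcl _ ihp _ hbc.1 hbc.2
    exact hmem _ hR

theorem pv_a_iff (g : List (List Int)) (hm : 0 < g.length) (hn : 0 < g.headI.length)
    (hc : ¬ pvCell g 0 0 = 1) :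
    (can_exit g = true ↔
      pvReach g ((g.length : Int) - 1, (g.headI.length : Int) - 1)) := by
  unfold can_exit
  rw [dif_neg hc]
  exact pvDfs_true_iff g hm hn _ _ _ _ (le_refl _) (pvAInv_init g)

-- ===== VERDICT (by name: the statement is the Claim_ definition above) =====
theorem can_exit_spec : Claim_equal_can_exit := by
  intro lst hdom hpre
  unfold Spec_can_exit
  obtain ⟨hne, hn0, hrow⟩ := hpre
  have hm : 0 < lst.length := List.length_pos_of_ne_nil hne
  by_cases hc : pvCell lst 0 0 = 1
  · unfold can_exit can_exit_alt
    rw [dif_pos hc, if_pos (by simp [hc])]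
  · exact Bool.eq_iff_iff.mpr ((pv_a_iff lst hm hn0 hc).trans (pv_alt_iff lst hm hn0 hc).symm)
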